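-- pv_equiv track=rewrite | github.com/jrm5100/advent-of-code-python | 2018/05/solution.py | collapse_polymer
-- ===== SOURCE A (Python) =====
-- def react(left, right):
--     if left.upper() != right.upper():
--         return False
--     elif left.islower() and right.isupper():
--         return True
--     elif left.isupper() and right.islower():
--         return True
--     else:
--         return False
--
-- def collapse_polymer(polymer: str) -> str:
--     """Remove components that interact with one another and return the result"""
--     polymer = [c for c in polymer]
--     i = 0
--     while i < len(polymer)-1:
--         if react(polymer[i], polymer[i+1]):
--             # Delete the reacted ones and go back one space (if possible) to look for newly created reaction pairs
--             del polymer[i:i+2]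
--             if i > 0:
--                 i -= 1
--         else:
--             i += 1
--     return "".join(polymer)
-- ===== SOURCE B (Python) =====
-- def collapse_polymer(polymer: str) -> str:
--     """Remove components that interact with one another and return the result"""
--     stack = []
--     for c in polymer:
--         if stack and stack[-1] != c and stack[-1].upper() == c.upper():
--             stack.pop()
--         else:
--             stack.append(c)
--     return "".join(stack)
-- ===== Notes on version B (the rewrite author's own statement) =====
-- stated objective: faster
-- what changed: Replaced A's while-loop that repeatedly deletes reacting pairs from the list in place and steps the index back with a single left-to-right pass maintaining a stack (push each unit, pop when it reacts with the stack top).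
import Mathlib
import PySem

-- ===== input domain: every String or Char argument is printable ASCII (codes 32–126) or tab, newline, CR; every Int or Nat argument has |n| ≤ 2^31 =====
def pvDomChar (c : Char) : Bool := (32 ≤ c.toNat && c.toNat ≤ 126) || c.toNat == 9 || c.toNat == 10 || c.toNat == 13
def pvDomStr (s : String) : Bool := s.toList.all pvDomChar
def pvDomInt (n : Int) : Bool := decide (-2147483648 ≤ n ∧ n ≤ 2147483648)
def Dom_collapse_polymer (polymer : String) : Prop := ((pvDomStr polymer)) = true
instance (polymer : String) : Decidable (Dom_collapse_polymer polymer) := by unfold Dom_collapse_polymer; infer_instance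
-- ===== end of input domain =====

-- B replaces A's quadratic index-juggling while-loop (with in-place pair deletion and back-stepping) by a single left-to-right stack pass: push each unit, pop when it reacts with the stack top.


-- ===== PORT A =====
-- literal port of A's helper `react` (`c.upper()` on a one-character string is `PySem.Chars.upperChar`)
def reactA (left right : Char) : Bool :=
  if PySem.Chars.upperChar left ≠ PySem.Chars.upperChar right then false
  else if PySem.Chars.islower left && PySem.Chars.isupper right then true
  else if PySem.Chars.isupper left && PySem.Chars.islower right then true
  else false

-- A's while-loop over (list, i): `del polymer[i:i+2]` is `take i ++ drop (i+2)`; the guard keeps both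
-- indexes in range. `fuel` only makes the recursion structural: each iteration strictly decreases
-- 2*p.length - i, so fuel 2*p.length never runs out (proved inside aloop_eq_foldl below).
def aloop (fuel : Nat) (p : List Char) (i : Nat) : List Char :=
  match fuel with
  | 0 => p
  | fuel + 1 =>
    if h : i < p.length - 1 then
      if reactA (p[i]'(by omega)) (p[i+1]'(by omega)) then
        aloop fuel (p.take i ++ p.drop (i+2)) (if 0 < i then i - 1 else i)
      else
        aloop fuel p (i + 1)
    else p

def collapse_polymer (polymer : String) : String :=
  String.ofList (aloop (2 * polymer.toList.length) polymer.toList 0)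

-- ===== PORT B =====
-- B's stack step: pop when the new unit reacts with the top (`t != c and t.upper() == c.upper()`), else push
def stepAlt (s : List Char) (c : Char) : List Char :=
  match s with
  | t :: s' =>
      if (t != c) && (PySem.Chars.upperChar t == PySem.Chars.upperChar c) then s'
      else c :: t :: s'
  | [] => [c]

-- the stack is kept top-first, so the final join reverses it
def collapse_polymer_alt (polymer : String) : String :=
  String.ofList ((polymer.toList.foldl stepAlt []).reverse)

-- ===== PRECONDITION & SPEC =====
def Spec_collapse_polymer (polymer : String) (out : String) : Prop := out = collapse_polymer_alt polymer
instance (polymer : String) (out : String) : Decidable (Spec_collapse_polymer polymer out) := by unfold Spec_collapse_polymer; infer_instance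

-- ===== CLAIM (what is proved, stated in full; the proofs are below) =====
def Claim_equal_collapse_polymer : Prop := ∀ (polymer : String), Dom_collapse_polymer polymer → Spec_collapse_polymer polymer (collapse_polymer polymer)

-- ===== LEMMAS AND PROOFS =====

theorem toNat_charOfNat (n : Nat) (h : n < 55296) : (Char.ofNat n).toNat = n := by
  unfold Char.ofNat
  split
  · simp [Char.ofNatAux, Char.toNat]
  · rename_i hv; exact absurd (Or.inl h) hv

theorem char_eq_iff_toNat (a b : Char) : a = b ↔ a.toNat = b.toNat := by
  constructor
  · intro h; rw [h]
  · intro h; exact Char.ext (UInt32.toNat_inj.mp h)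

theorem islower_iff (c : Char) : PySem.Chars.islower c = true ↔ 97 ≤ c.toNat ∧ c.toNat ≤ 122 := by
  simp only [PySem.Chars.islower, Bool.and_eq_true, decide_eq_true_eq, Char.le_def,
    UInt32.le_iff_toNat_le]
  exact Iff.rfl

theorem isupper_iff (c : Char) : PySem.Chars.isupper c = true ↔ 65 ≤ c.toNat ∧ c.toNat ≤ 90 := by
  simp only [PySem.Chars.isupper, Bool.and_eq_true, decide_eq_true_eq, Char.le_def,
    UInt32.le_iff_toNat_le]
  exact Iff.rfl

theorem toNat_upperChar_lower (c : Char) (h : PySem.Chars.islower c = true) :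
    (PySem.Chars.upperChar c).toNat = c.toNat - 32 := by
  have h2 := (islower_iff c).mp h
  simp only [PySem.Chars.upperChar, h, if_true]
  exact toNat_charOfNat _ (by omega)

theorem upperChar_not_lower (c : Char) (h : PySem.Chars.islower c = false) :
    PySem.Chars.upperChar c = c := by
  simp [PySem.Chars.upperChar, h]

theorem react_eq (l r : Char) :
    ((l != r) && (PySem.Chars.upperChar l == PySem.Chars.upperChar r)) = reactA l r := by
  unfold reactA
  rcases hl : PySem.Chars.islower l <;> rcases hr : PySem.Chars.islower r
  · -- neither lower: upperChar = id on both
    rw [upperChar_not_lower l hl, upperChar_not_lower r hr]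
    by_cases he : l = r
    · subst he; simp [hl]
    · simp [he, bne_iff_ne]
  · -- r lower only
    rw [upperChar_not_lower l hl]
    have hrn := (islower_iff r).mp hr
    have hup := toNat_upperChar_lower r hr
    by_cases he : l = PySem.Chars.upperChar r
    · have hlu : PySem.Chars.isupper l = true := by
        rw [isupper_iff, he, hup]; omega
      have hne : l ≠ r := by
        intro h; rw [h] at hlu
        have := (isupper_iff r).mp hlu; omega
      have hne' : PySem.Chars.upperChar r ≠ r := he ▸ hne
      have hlu' : PySem.Chars.isupper (PySem.Chars.upperChar r) = true := he ▸ hlu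
      simp [he, hne', hlu', hl, hr]
    · simp [he, hl]
  · -- l lower only
    rw [upperChar_not_lower r hr]
    have hln := (islower_iff l).mp hl
    have hup := toNat_upperChar_lower l hl
    by_cases he : PySem.Chars.upperChar l = r
    · have hru : PySem.Chars.isupper r = true := by
        rw [isupper_iff, ← he, hup]; omega
      have hne : l ≠ r := by
        intro h; rw [← h] at hru
        have := (isupper_iff l).mp hru; omega
      have hne' : l ≠ PySem.Chars.upperChar l := fun h => hne (h.trans he)
      simp [he, hne, hne', hru, hl, hr]
    · simp [he, hl, hr]
  · -- both lower
    have hlu := toNat_upperChar_lower l hl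
    have hru := toNat_upperChar_lower r hr
    have hln := (islower_iff l).mp hl
    have hrn := (islower_iff r).mp hr
    by_cases he : PySem.Chars.upperChar l = PySem.Chars.upperChar r
    · have : l = r := by
        rw [char_eq_iff_toNat]
        rw [char_eq_iff_toNat] at he
        omega
      subst this
      have hu : PySem.Chars.isupper l = false := by
        rcases h : PySem.Chars.isupper l
        · rfl
        · have := (isupper_iff l).mp h; omega
      simp [he, hu, hl]
    · simp [he]

-- invariant: the stack (top-first) never holds an adjacent reacting pair
def IrrStack (s : List Char) : Prop := List.IsChain (fun x y => reactA y x = false) s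

-- the stack top does not react with the next input unit
def HeadOk (s r : List Char) : Prop :=
  match s, r with
  | t :: _, c :: _ => reactA t c = false
  | _, _ => True

theorem stepAlt_push (s : List Char) (c : Char) (h : HeadOk s (c :: [])) :
    stepAlt s c = c :: s := by
  cases s with
  | nil => rfl
  | cons t s' =>
    have : reactA t c = false := h
    simp [stepAlt, react_eq, this]

theorem aloop_eq_foldl (n : Nat) (s r : List Char)
    (hn : 2 * r.length + s.length ≤ n)
    (hirr : IrrStack s) (hh : HeadOk s r) :
    aloop n (s.reverse ++ r) s.length = (r.foldl stepAlt s).reverse := by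
  induction n generalizing s r with
  | zero =>
    have hr : r = [] := by cases r <;> simp_all
    have hs : s = [] := by cases s <;> simp_all
    subst hr; subst hs; rfl
  | succ m ih =>
    match r with
    | [] =>
      rw [aloop, dif_neg (by simp only [List.append_nil, List.length_reverse]; omega)]
      simp
    | [c] =>
      rw [aloop, dif_neg (by simp only [List.length_append, List.length_reverse,
        List.length_cons, List.length_nil]; omega)]
      have hp : stepAlt s c = c :: s := stepAlt_push s c hh
      simp [hp]
    | c0 :: c1 :: rest =>
      have hg : s.length < (s.reverse ++ c0 :: c1 :: rest).length - 1 := by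
        simp only [List.length_append, List.length_reverse, List.length_cons]; omega
      have h0 : (s.reverse ++ c0 :: c1 :: rest)[s.length]'(by omega) = c0 := by
        rw [List.getElem_append_right (by simp)]
        simp
      have h1 : (s.reverse ++ c0 :: c1 :: rest)[s.length + 1]'(by omega) = c1 := by
        rw [List.getElem_append_right (by simp)]
        simp
      rw [aloop, dif_pos hg]
      simp only [h0, h1]
      have htake : (s.reverse ++ c0 :: c1 :: rest).take s.length = s.reverse := by
        rw [← List.length_reverse (as := s)]
        exact List.take_left
      have hdrop : (s.reverse ++ c0 :: c1 :: rest).drop (s.length + 2) = rest := by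
        simp [List.drop_append]
      by_cases hre : reactA c0 c1 = true
      · rw [if_pos hre]
        rw [htake, hdrop]
        -- foldl: stepAlt s c0 = c0 :: s (HeadOk), then stepAlt (c0::s) c1 pops to s
        have hpush : stepAlt s c0 = c0 :: s := stepAlt_push s c0 (by cases s with
          | nil => trivial
          | cons t s' => exact hh)
        have hpop : stepAlt (c0 :: s) c1 = s := by
          simp [stepAlt, react_eq, hre]
        rw [List.foldl_cons, hpush, List.foldl_cons, hpop]
        cases s with
        | nil =>
          simp only [List.length_nil, List.reverse_nil, List.nil_append]
          have := ih [] rest (by simp at hn ⊢; omega) List.IsChain.nil trivial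
          simpa using this
        | cons t s' =>
          rw [if_pos (by simp)]
          have hrev : (t :: s').reverse ++ rest = s'.reverse ++ (t :: rest) := by simp
          have hlen2 : (t :: s').length - 1 = s'.length := rfl
          rw [hrev, hlen2]
          have hch : IrrStack s' := by
            cases s' with
            | nil => exact List.IsChain.nil
            | cons u s'' => exact (List.isChain_cons_cons.mp hirr).2
          have hho : HeadOk s' (t :: rest) := by
            cases s' with
            | nil => trivial
            | cons u s'' => exact (List.isChain_cons_cons.mp hirr).1
          have hih := ih s' (t :: rest) (by simp at hn ⊢; omega) hch hho
          rw [hih]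
          conv_lhs => rw [List.foldl_cons, stepAlt_push s' t (by cases s' with
            | nil => trivial
            | cons u s'' => exact hho)]
      · rw [if_neg hre]
        have hpush : stepAlt s c0 = c0 :: s := stepAlt_push s c0 (by cases s with
          | nil => trivial
          | cons t s' => exact hh)
        have heq : s.reverse ++ c0 :: c1 :: rest = (c0 :: s).reverse ++ (c1 :: rest) := by simp
        have : s.length + 1 = (c0 :: s).length := rfl
        rw [heq, this]
        have hchain : IrrStack (c0 :: s) := by
          cases s with
          | nil => exact List.IsChain.singleton _
          | cons t s' => exact List.IsChain.cons_cons hh hirr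
        have := ih (c0 :: s) (c1 :: rest) (by simp at hn ⊢; omega) hchain
          (by simp [HeadOk]; simpa using hre)
        rw [this]
        conv_rhs => rw [List.foldl_cons, hpush]

-- ===== VERDICT (by name: the statement is the Claim_ definition above) =====
theorem collapse_polymer_spec : Claim_equal_collapse_polymer := by
  intro polymer _
  unfold Spec_collapse_polymer collapse_polymer collapse_polymer_alt
  have h := aloop_eq_foldl (2 * polymer.toList.length) [] polymer.toList
    (by simp) List.IsChain.nil (by cases polymer.toList <;> trivial)
  exact congrArg String.ofList (by simpa using h)
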